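-- pv_equiv track=rewrite | github.com/seanxgao/GoodLuckFindAJob | JDScraper/screener.py | quick_senior_keyword_check
-- ===== SOURCE A (Python) =====
-- def quick_senior_keyword_check(title: str) -> bool:
--     """
--     Quick keyword-based check for obvious senior positions.
--     Returns True if should be rejected (is senior), False otherwise.
--     """
--     if not title:
--         return False
--
--     text = f"{title}".lower()
--
--     # Keywords that indicate senior positions (in title)
--     senior_keywords = [
--         "senior", "sr.", "sr ", "lead", "principal",
--         "chief", "director", "head of", "vp ", "vice president",
--         "manager"
--     ]
--
--     # Check if any keyword appears (case-insensitive)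
--     for keyword in senior_keywords:
--         if keyword in text:
--             return True
--
--     return False
-- ===== SOURCE B (Python) =====
-- def quick_senior_keyword_check(title: str) -> bool:
--     """
--     Quick keyword-based check for obvious senior positions.
--     First-character dispatch: index the keywords in a dict keyed by their
--     first letter, then scan the text once, at each position consulting only
--     the bucket of keywords that could start with the character seen there.
--     """
--     if not title:
--         return False
--
--     text = f"{title}".lower()
--
--     senior_keywords = [
--         "senior", "sr.", "sr ", "lead", "principal",
--         "chief", "director", "head of", "vp ", "vice president",
--         "manager"
--     ]
--
--     by_first = {}
--     for k in senior_keywords: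
--         by_first.setdefault(k[0], []).append(k)
--
--     for i, c in enumerate(text):
--         for k in by_first.get(c, []):
--             if text.startswith(k, i):
--                 return True
--     return False
-- ===== Notes on version B (the rewrite author's own statement) =====
-- stated objective: alternative
-- what changed: Replaces A's keyword-major loop of 11 full substring searches by a first-character dispatch: keywords are indexed in a dict keyed by their first letter built once, then the text is scanned position by position consulting only the bucket for the character at that position.
import Mathlib
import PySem

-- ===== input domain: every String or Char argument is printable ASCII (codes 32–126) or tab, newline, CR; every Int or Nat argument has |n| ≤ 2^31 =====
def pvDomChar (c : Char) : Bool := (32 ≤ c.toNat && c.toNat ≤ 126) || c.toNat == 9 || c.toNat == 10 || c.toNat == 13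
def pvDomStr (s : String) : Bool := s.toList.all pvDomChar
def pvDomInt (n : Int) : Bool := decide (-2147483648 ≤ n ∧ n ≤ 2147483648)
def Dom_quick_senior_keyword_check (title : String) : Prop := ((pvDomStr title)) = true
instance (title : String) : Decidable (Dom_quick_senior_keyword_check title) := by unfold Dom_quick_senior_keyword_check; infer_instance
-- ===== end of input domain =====

-- B replaces A's keyword-major loop of 11 substring searches by a first-character
-- dispatch: a dict from first letter to keyword bucket, built once, consulted at
-- each position of a single scan (alternative, same cost).

-- ===== PORT A =====
def pvKwsA : List String :=
  ["senior", "sr.", "sr ", "lead", "principal",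
   "chief", "director", "head of", "vp ", "vice president",
   "manager"]

-- 'for keyword in senior_keywords: if keyword in text: return True' as structural recursion
def pvALoop (kws : List String) (text : String) : Bool :=
  match kws with
  | [] => false
  | k :: rest => if PySem.Str.isIn k text then true else pvALoop rest text

def quick_senior_keyword_check (title : String) : Bool :=
  if title == "" then false
  else pvALoop pvKwsA (PySem.Str.lower title)

-- ===== PORT B =====
def pvKwsB : List (List Char) :=
  ["senior".toList, "sr.".toList, "sr ".toList, "lead".toList, "principal".toList,
   "chief".toList, "director".toList, "head of".toList, "vp ".toList, "vice president".toList,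
   "manager".toList]

-- 'for k in senior_keywords: by_first.setdefault(k[0], []).append(k)'
-- (k[0] via headD; every keyword is a nonempty literal, so the default is never used)
def pvByFirst : PySem.Dict Char (List (List Char)) :=
  pvKwsB.foldl (fun d k => d.insert (k.headD ' ') (d.getD (k.headD ' ') [] ++ [k]))
    PySem.Dict.empty

-- 'for i, c in enumerate(text): for k in by_first.get(c, []): if text.startswith(k, i)'
-- as recursion over the suffixes of the text (text.startswith(k, i) = k.isPrefixOf (drop i))
def pvBScan : List Char → Bool
  | [] => false
  | c :: rest =>
    if (pvByFirst.getD c []).any (fun k => k.isPrefixOf (c :: rest)) then true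
    else pvBScan rest

def quick_senior_keyword_check_alt (title : String) : Bool :=
  if title == "" then false
  else pvBScan (PySem.Str.lower title).toList

-- ===== PRECONDITION & SPEC =====
def Spec_quick_senior_keyword_check (title : String) (out : Bool) : Prop := out = quick_senior_keyword_check_alt title
instance (title : String) (out : Bool) : Decidable (Spec_quick_senior_keyword_check title out) := by unfold Spec_quick_senior_keyword_check; infer_instance

-- ===== CLAIM (what is proved, stated in full; the proofs are below) =====
def Claim_equal_quick_senior_keyword_check : Prop := ∀ (title : String), Dom_quick_senior_keyword_check title → Spec_quick_senior_keyword_check title (quick_senior_keyword_check title)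

-- ===== LEMMAS AND PROOFS =====

theorem pvALoop_eq_any (kws : List String) (text : String) :
    pvALoop kws text = kws.any (fun k => PySem.Str.isIn k text) := by
  induction kws with
  | nil => rfl
  | cons k rest ih =>
    simp only [pvALoop, List.any_cons, ih]
    cases hb : PySem.Str.isIn k text <;> simp

-- dispatch is complete: the bucket at c sees exactly the keywords that can match at c
theorem pvBucket_any (c : Char) (s : List Char) :
    (pvByFirst.getD c []).any (fun k => k.isPrefixOf (c :: s))
      = pvKwsB.any (fun k => k.isPrefixOf (c :: s)) := by
  have hd : pvByFirst = PySem.Dict.mk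
      [('s', ["senior".toList, "sr.".toList, "sr ".toList]),
       ('l', ["lead".toList]),
       ('p', ["principal".toList]),
       ('c', ["chief".toList]),
       ('d', ["director".toList]),
       ('h', ["head of".toList]),
       ('v', ["vp ".toList, "vice president".toList]),
       ('m', ["manager".toList])] := by decide
  rw [hd]
  by_cases h1 : c = 's'; · subst h1; simp [PySem.Dict.getD, PySem.Dict.get?_mk_cons, pvKwsB, List.isPrefixOf]
  by_cases h2 : c = 'l'; · subst h2; simp [PySem.Dict.getD, PySem.Dict.get?_mk_cons, pvKwsB, List.isPrefixOf]
  by_cases h3 : c = 'p'; · subst h3; simp [PySem.Dict.getD, PySem.Dict.get?_mk_cons, pvKwsB, List.isPrefixOf]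
  by_cases h4 : c = 'c'; · subst h4; simp [PySem.Dict.getD, PySem.Dict.get?_mk_cons, pvKwsB, List.isPrefixOf]
  by_cases h5 : c = 'd'; · subst h5; simp [PySem.Dict.getD, PySem.Dict.get?_mk_cons, pvKwsB, List.isPrefixOf]
  by_cases h6 : c = 'h'; · subst h6; simp [PySem.Dict.getD, PySem.Dict.get?_mk_cons, pvKwsB, List.isPrefixOf]
  by_cases h7 : c = 'v'; · subst h7; simp [PySem.Dict.getD, PySem.Dict.get?_mk_cons, pvKwsB, List.isPrefixOf]
  by_cases h8 : c = 'm'; · subst h8; simp [PySem.Dict.getD, PySem.Dict.get?_mk_cons, pvKwsB, List.isPrefixOf]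
  simp [PySem.Dict.getD, PySem.Dict.get?, pvKwsB, List.isPrefixOf,
        Ne.symm h1, Ne.symm h2, Ne.symm h3, Ne.symm h4, Ne.symm h5, Ne.symm h6,
        Ne.symm h7, Ne.symm h8]

theorem pvBScan_iff (s : List Char) :
    pvBScan s = true ↔ ∃ k ∈ pvKwsB, ∃ j, k <+: s.drop j := by
  induction s with
  | nil =>
    simp only [pvBScan, Bool.false_eq_true, false_iff]
    rintro ⟨k, hk, j, hp⟩
    have hne : ∀ k ∈ pvKwsB, k ≠ [] := by decide
    exact hne k hk (List.prefix_nil.mp (by simpa using hp))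
  | cons c rest ih =>
    simp only [pvBScan, pvBucket_any]
    split_ifs with h
    · simp only [true_iff]
      rcases List.any_eq_true.mp h with ⟨k, hk, hp⟩
      exact ⟨k, hk, 0, List.isPrefixOf_iff_prefix.mp hp⟩
    · rw [ih]
      constructor
      · rintro ⟨k, hk, j, hp⟩
        exact ⟨k, hk, j + 1, by simpa [List.drop_succ_cons] using hp⟩
      · rintro ⟨k, hk, j, hp⟩
        cases j with
        | zero =>
          exact absurd ((List.any_eq_true (p := fun k => k.isPrefixOf (c :: rest))).mpr
            ⟨k, hk, List.isPrefixOf_iff_prefix.mpr (show k <+: c :: rest by simpa using hp)⟩) h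
        | succ m => exact ⟨k, hk, m, by simpa [List.drop_succ_cons] using hp⟩

-- ===== VERDICT (by name: the statement is the Claim_ definition above) =====
theorem quick_senior_keyword_check_spec : Claim_equal_quick_senior_keyword_check := by
  intro title _
  unfold Spec_quick_senior_keyword_check quick_senior_keyword_check quick_senior_keyword_check_alt
  split_ifs with h
  · rfl
  set text := PySem.Str.lower title with htext
  rw [pvALoop_eq_any]
  rw [Bool.eq_iff_iff, List.any_eq_true, pvBScan_iff,
      show pvKwsB = pvKwsA.map String.toList from rfl]
  constructor
  · rintro ⟨k, hk, hin⟩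
    have hin' : PySem.Chars.isIn k.toList text.toList = true := by
      simpa [PySem.Str.isIn_eq] using hin
    rcases (PySem.Chars.exists_prefix_drop_iff_isIn k.toList text.toList).mpr hin' with ⟨j, hp⟩
    exact ⟨k.toList, List.mem_map_of_mem hk, j, hp⟩
  · rintro ⟨k', hk', j, hp⟩
    rcases List.mem_map.mp hk' with ⟨k, hk, rfl⟩
    refine ⟨k, hk, ?_⟩
    have : PySem.Chars.isIn k.toList text.toList = true :=
      (PySem.Chars.exists_prefix_drop_iff_isIn k.toList text.toList).mp ⟨j, hp⟩
    simpa [PySem.Str.isIn_eq] using this
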